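-- pv_equiv track=rewrite | github.com/elspiderma/uaviak-timetable | src/utils/string.py | index_upper
-- ===== SOURCE A (Python) =====
-- def index_upper(s: str, revers: bool = False):
--     """
--     Ищет первую заглавную букву.
--     Args:
--         s: Строка.
--         revers: Искать в обраном порядке.
--
--     Returns:
--         Индекс первой (или последней, если `revers==True`) заглавной буквы.
--
--     Raises:
--         ValueError: В строке нет заглавных букв.
--     """
--     iter_str = tuple(enumerate(s))
--     if revers:
--         iter_str = reversed(iter_str)
--
--     for n, i in iter_str:
--         if i.isupper():
--             return n
--
--     raise ValueError("Upper letter case not found")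
-- ===== SOURCE B (Python) =====
-- def index_upper(s: str, revers: bool = False):
--     ups = [i for i, c in enumerate(s) if c.isupper()]
--     if not ups:
--         raise ValueError("Upper letter case not found")
--     return ups[-1] if revers else ups[0]
-- ===== Notes on version B (the rewrite author's own statement) =====
-- stated objective: alternative
-- what changed: B builds the full list of uppercase positions in one comprehension and selects an endpoint (first/last), instead of A's early-return scan over a possibly reversed enumerate tuple.
import Mathlib
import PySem

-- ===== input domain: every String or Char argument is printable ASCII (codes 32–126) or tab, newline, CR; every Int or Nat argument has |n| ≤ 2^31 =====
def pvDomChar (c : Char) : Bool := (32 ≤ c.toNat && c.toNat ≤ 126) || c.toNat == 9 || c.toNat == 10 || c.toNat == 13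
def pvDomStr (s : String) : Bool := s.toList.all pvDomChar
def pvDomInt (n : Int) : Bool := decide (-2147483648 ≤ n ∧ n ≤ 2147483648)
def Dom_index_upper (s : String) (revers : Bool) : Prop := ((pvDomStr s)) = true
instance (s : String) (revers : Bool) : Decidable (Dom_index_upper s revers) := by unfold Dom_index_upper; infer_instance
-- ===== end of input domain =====

-- B builds the full list of uppercase positions and picks an endpoint, instead of A's
-- early-return scan over a possibly reversed enumeration; same cost, different decomposition.

-- ===== PORT A =====
-- A's for-loop with early return: first matching index, none = fell through to the raise.
def idxUpScan : List (Int × Char) → Option Int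
  | [] => none
  | (n, c) :: rest => if PySem.Chars.isupper c then some n else idxUpScan rest

def index_upper (s : String) (revers : Bool) : Int :=
  let iter0 := PySem.List.enumerate s.toList
  let iter := if revers then iter0.reverse else iter0
  (idxUpScan iter).getD 0    -- none = the ValueError, excluded by Pre_

-- ===== PORT B =====
def index_upper_alt (s : String) (revers : Bool) : Int :=
  let ups := ((PySem.List.enumerate s.toList).filter
                (fun p => PySem.Chars.isupper p.2)).map Prod.fst
  ((if revers then PySem.List.pyGet? ups (-1) else PySem.List.pyGet? ups 0).getD 0)
  -- empty ups = the ValueError, excluded by Pre_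

-- ===== PRECONDITION & SPEC =====
-- Pre_ excludes exactly the strings with no uppercase letter, on which both A and B raise ValueError.
def Pre_index_upper (s : String) (revers : Bool) : Prop :=
  s.toList.any PySem.Chars.isupper = true
instance (s : String) (revers : Bool) : Decidable (Pre_index_upper s revers) := by
  unfold Pre_index_upper; infer_instance
def pvWitness_index_upper : String × Bool := ("A", false)

def Spec_index_upper (s : String) (revers : Bool) (out : Int) : Prop := out = index_upper_alt s revers
instance (s : String) (revers : Bool) (out : Int) : Decidable (Spec_index_upper s revers out) := by unfold Spec_index_upper; infer_instance

-- ===== CLAIM (what is proved, stated in full; the proofs are below) =====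
def Claim_equal_index_upper : Prop := ∀ (s : String) (revers : Bool), Dom_index_upper s revers → Pre_index_upper s revers → Spec_index_upper s revers (index_upper s revers)

-- ===== LEMMAS AND PROOFS =====

theorem idxUpScan_eq_head? (l : List (Int × Char)) :
    idxUpScan l = ((l.filter (fun p => PySem.Chars.isupper p.2)).map Prod.fst).head? := by
  induction l with
  | nil => rfl
  | cons p rest ih =>
    obtain ⟨n, c⟩ := p
    by_cases h : PySem.Chars.isupper c
    · simp [idxUpScan, h, List.filter_cons]
    · simp [idxUpScan, h, List.filter_cons, ih]

theorem pyGet?_zero (l : List Int) : PySem.List.pyGet? l 0 = l.head? := by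
  cases l with
  | nil => rfl
  | cons x xs => simp [PySem.List.pyGet?_zero_cons, List.head?]

-- ===== VERDICT (by name: the statement is the Claim_ definition above) =====
theorem index_upper_spec : Claim_equal_index_upper := by
  intro s revers _ _
  show index_upper s revers = index_upper_alt s revers
  cases revers <;>
    simp [index_upper, index_upper_alt, idxUpScan_eq_head?, pyGet?_zero,
          PySem.List.pyGet?_neg_one, List.filter_reverse, List.map_reverse,
          List.head?_reverse]
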